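-- pv_equiv track=rewrite | github.com/Arongbang/srt-ja-ko-translator | srt_processor.py | _rebuild_srt
-- ===== SOURCE A (Python) =====
-- def _rebuild_srt(blocks: list[list[str]]) -> str:
--     result_lines: list[str] = []
--     for new_index, block in enumerate(blocks, start=1):
--         if len(block) < 3:
--             continue
--         result_lines.append(str(new_index))
--         result_lines.extend(block[1:])
--         result_lines.append("")
--     return "\n".join(result_lines).rstrip() + "\n"
-- ===== SOURCE B (Python) =====
-- def _rebuild_srt(blocks: list[list[str]]) -> str:
--     def go(rest: list[list[str]], i: int) -> str:
--         if not rest: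
--             return ""
--         tail = go(rest[1:], i + 1)
--         block = rest[0]
--         if len(block) < 3:
--             return tail
--         return str(i) + "\n" + "\n".join(block[1:]) + "\n\n" + tail
--     return go(blocks, 1).rstrip() + "\n"
-- ===== Notes on version B (the rewrite author's own statement) =====
-- stated objective: alternative
-- what changed: Replaces A's forward loop that accumulates a flat list of lines with empty-string sentinels (joined, rstripped at the end) by a back-to-front structural recursion that builds the result string directly, concatenating each kept block's numbered text onto the already-built tail, with no intermediate line list and no sentinels.
import Mathlib
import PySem

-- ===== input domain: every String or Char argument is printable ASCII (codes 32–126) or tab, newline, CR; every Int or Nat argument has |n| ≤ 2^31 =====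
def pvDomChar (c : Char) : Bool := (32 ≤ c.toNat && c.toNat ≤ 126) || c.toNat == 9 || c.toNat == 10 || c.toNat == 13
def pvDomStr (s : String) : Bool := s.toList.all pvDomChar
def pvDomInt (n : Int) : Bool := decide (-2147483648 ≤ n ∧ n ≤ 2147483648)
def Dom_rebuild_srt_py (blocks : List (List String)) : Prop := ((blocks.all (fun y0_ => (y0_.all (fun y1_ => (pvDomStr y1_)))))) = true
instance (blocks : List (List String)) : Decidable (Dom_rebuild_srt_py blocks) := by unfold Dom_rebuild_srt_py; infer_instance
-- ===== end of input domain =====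

-- B replaces A's forward loop that accumulates a flat list of lines (with "" sentinels,
-- joined at the end) by a back-to-front structural recursion that concatenates the result
-- string directly, one numbered block at a time (objective: alternative decomposition).

-- ===== PORT A =====
-- literal transliteration of A: accumulate flat result_lines, then join / rstrip / + "\n"
def rebuild_srt_py (blocks : List (List String)) : String :=
  let result_lines : List String :=
    (PySem.List.enumerate blocks 1).foldl
      (fun acc p =>
        if p.2.length < 3 then acc
        else (acc ++ [PySem.Int.toStr p.1]) ++ PySem.List.slice p.2 (some 1) none ++ [""])
      []
  PySem.Str.rstrip (PySem.Str.join "\n" result_lines) ++ "\n"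

-- ===== PORT B =====
-- literal transliteration of B's inner recursion `go`: build the tail text first,
-- then either skip the short block or prepend "index\n" + joined body + "\n\n"
def pvGoB : List (List String) → Int → String
  | [], _ => ""
  | block :: rest, i =>
    let tail := pvGoB rest (i + 1)
    if block.length < 3 then tail
    else PySem.Int.toStr i ++ "\n" ++ PySem.Str.join "\n" (PySem.List.slice block (some 1) none)
          ++ "\n\n" ++ tail

def rebuild_srt_py_alt (blocks : List (List String)) : String :=
  PySem.Str.rstrip (pvGoB blocks 1) ++ "\n"

-- ===== PRECONDITION & SPEC =====
def Spec_rebuild_srt_py (blocks : List (List String)) (out : String) : Prop := out = rebuild_srt_py_alt blocks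
instance (blocks : List (List String)) (out : String) : Decidable (Spec_rebuild_srt_py blocks out) := by unfold Spec_rebuild_srt_py; infer_instance

-- ===== CLAIM (what is proved, stated in full; the proofs are below) =====
def Claim_equal_rebuild_srt_py : Prop := ∀ (blocks : List (List String)), Dom_rebuild_srt_py blocks → Spec_rebuild_srt_py blocks (rebuild_srt_py blocks)

-- ===== LEMMAS AND PROOFS =====

-- A's loop shape: skip-or-append-a-list fold equals flatMap over the filtered list
theorem foldl_skip_append {α β : Type} (c : α → Bool) (g : α → List β)
    (l : List α) (acc : List β) :
    l.foldl (fun acc x => if c x then acc else acc ++ g x) acc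
      = acc ++ (l.filter (fun x => !c x)).flatMap g := by
  induction l generalizing acc with
  | nil => simp
  | cons x xs ih =>
    by_cases h : c x = true <;> simp [List.foldl_cons, h, ih, List.append_assoc]

theorem join_cons_ne (sep : List Char) (x : List Char) (l : List (List Char)) (h : l ≠ []) :
    PySem.Chars.join sep (x :: l) = x ++ sep ++ PySem.Chars.join sep l := by
  cases l with
  | nil => exact absurd rfl h
  | cons y t => exact PySem.Chars.join_cons_cons sep x y t

theorem join_append_ne (sep : List Char) (a b : List (List Char)) (ha : a ≠ []) (hb : b ≠ []) :
    PySem.Chars.join sep (a ++ b)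
      = PySem.Chars.join sep a ++ sep ++ PySem.Chars.join sep b := by
  induction a with
  | nil => exact absurd rfl ha
  | cons x a' ih =>
    cases a' with
    | nil =>
      rw [List.singleton_append, join_cons_ne sep x b hb, PySem.Chars.join_singleton]
    | cons y t =>
      have hne : (y :: t : List (List Char)) ≠ [] := by simp
      rw [List.cons_append, join_cons_ne sep x ((y :: t) ++ b) (by simp),
        ih hne, join_cons_ne sep x (y :: t) hne]
      simp [List.append_assoc]

-- B's flat concatenation (each kept block followed by "\n\n") equals A's sentinel join
-- followed by one extra '\n' — provided there is at least one kept block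
theorem flatMap_vs_sentinel (qs : List (List (List Char)))
    (h : ∀ q ∈ qs, q ≠ []) (hne : qs ≠ []) :
    qs.flatMap (fun q => PySem.Chars.join ['\n'] q ++ ['\n', '\n'])
      = PySem.Chars.join ['\n'] (qs.flatMap (fun q => q ++ [[]])) ++ ['\n'] := by
  induction qs with
  | nil => exact absurd rfl hne
  | cons q qs ih =>
    have hq : q ≠ [] := h q (by simp)
    have hq1 : PySem.Chars.join ['\n'] (q ++ [[]])
        = PySem.Chars.join ['\n'] q ++ ['\n'] := by
      rw [join_append_ne ['\n'] q [[]] hq (by simp), PySem.Chars.join_singleton]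
      simp
    cases qs with
    | nil =>
      simp only [List.flatMap_cons, List.flatMap_nil, List.append_nil, hq1]
      simp [List.append_assoc]
    | cons q' qs' =>
      have hrest : ∀ r ∈ (q' :: qs'), r ≠ [] := fun r hr => h r (by simp [hr])
      have hflatne : ((q' :: qs').flatMap (fun q => q ++ [[]])) ≠ [] := by
        rw [List.flatMap_cons]
        exact List.append_ne_nil_of_left_ne_nil (by simp) _
      have key : (q :: q' :: qs').flatMap (fun q => PySem.Chars.join ['\n'] q ++ ['\n', '\n'])
          = (PySem.Chars.join ['\n'] q ++ ['\n', '\n'])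
            ++ (q' :: qs').flatMap (fun q => PySem.Chars.join ['\n'] q ++ ['\n', '\n']) := by
        simp
      have key2 : (q :: q' :: qs').flatMap (fun q => q ++ [[]])
          = (q ++ [[]]) ++ (q' :: qs').flatMap (fun q => q ++ [[]]) := by
        simp
      rw [key, key2, ih hrest (by simp),
        join_append_ne ['\n'] (q ++ [[]]) _ (by simp [hq]) hflatne, hq1]
      simp [List.append_assoc]

theorem rstrip_append_newline (s : List Char) :
    PySem.Chars.rstrip (s ++ ['\n']) = PySem.Chars.rstrip s := by
  simp only [PySem.Chars.rstrip, List.reverse_append, List.reverse_cons, List.reverse_nil,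
    List.nil_append, List.singleton_append]
  rw [List.dropWhile_cons_of_pos (by decide)]

-- B's recursion computed in one go: flatMap over the filtered enumeration
theorem pvGoB_toList (l : List (List String)) (i : Int) :
    (pvGoB l i).toList
      = ((PySem.List.enumerate l i).filter (fun p => !decide (p.2.length < 3))).flatMap
          (fun p => PySem.Chars.join ['\n']
              ((PySem.Int.toStr p.1 :: PySem.List.slice p.2 (some 1) none).map String.toList)
            ++ ['\n', '\n']) := by
  induction l generalizing i with
  | nil => simp [pvGoB, PySem.List.enumerate_nil]
  | cons block rest ih =>
    rw [PySem.List.enumerate_cons]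
    by_cases h : block.length < 3
    · simp only [pvGoB, if_pos h, List.filter_cons, decide_eq_true h, Bool.not_true,
        Bool.false_eq_true, if_false, ih]
    · have hslice : PySem.List.slice block (some 1) none = block.tail :=
        PySem.List.slice_from_one block
      have htail : (block.tail.map String.toList) ≠ [] := by
        intro hc
        have hlen := congrArg List.length hc
        simp only [List.length_map, List.length_tail, List.length_nil] at hlen
        omega
      simp only [pvGoB, List.filter_cons, h, decide_false,
        Bool.not_false, if_true, List.flatMap_cons]
      rw [← ih (i + 1)]
      simp only [List.map_cons, hslice]
      rw [join_cons_ne ['\n'] _ _ htail, if_neg not_false]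
      have hnl : ("\n" : String).toList = ['\n'] := by decide
      have hnl2 : ("\n\n" : String).toList = ['\n', '\n'] := by decide
      simp [String.toList_append, PySem.Str.toList_join, hnl, hnl2, List.append_assoc]

-- ===== VERDICT (by name: the statement is the Claim_ definition above) =====
theorem rebuild_srt_py_spec : Claim_equal_rebuild_srt_py := by
  intro blocks _
  unfold Spec_rebuild_srt_py rebuild_srt_py rebuild_srt_py_alt
  rw [← String.toList_inj]
  simp only [String.toList_append, PySem.Str.toList_rstrip]
  congr 1
  set l := PySem.List.enumerate blocks 1 with hl
  -- A's fold as a flatMap over the kept pairs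
  have hfold :
      (l.foldl (fun acc p =>
          if p.2.length < 3 then acc
          else (acc ++ [PySem.Int.toStr p.1]) ++ PySem.List.slice p.2 (some 1) none ++ [""]) [])
        = (l.filter (fun p => !decide (p.2.length < 3))).flatMap
            (fun p => (PySem.Int.toStr p.1 :: PySem.List.slice p.2 (some 1) none) ++ [""]) := by
    have := foldl_skip_append (fun p : Int × List String => decide (p.2.length < 3))
      (fun p => (PySem.Int.toStr p.1 :: PySem.List.slice p.2 (some 1) none) ++ [""]) l []
    simpa [List.append_assoc] using this
  rw [hfold, pvGoB_toList blocks 1, ← hl]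
  set f := l.filter (fun p => !decide (p.2.length < 3)) with hf
  rw [PySem.Str.toList_join]
  have hmf : (f.flatMap (fun p => (PySem.Int.toStr p.1 :: PySem.List.slice p.2 (some 1) none) ++ [""])).map String.toList
      = (f.map (fun p => (PySem.Int.toStr p.1 :: PySem.List.slice p.2 (some 1) none).map String.toList)).flatMap
          (fun q => q ++ [[]]) := by
    rw [List.map_flatMap, List.flatMap_map]
    apply List.flatMap_congr
    intro p _
    simp
  have hbf : f.flatMap
      (fun p => PySem.Chars.join ['\n']
          ((PySem.Int.toStr p.1 :: PySem.List.slice p.2 (some 1) none).map String.toList)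
        ++ ['\n', '\n'])
      = (f.map (fun p => (PySem.Int.toStr p.1 :: PySem.List.slice p.2 (some 1) none).map String.toList)).flatMap
          (fun q => PySem.Chars.join ['\n'] q ++ ['\n', '\n']) := by
    rw [List.flatMap_map]
  rw [hmf, hbf]
  have hnl : ("\n" : String).toList = ['\n'] := by decide
  rw [hnl]
  set qs := f.map (fun p => (PySem.Int.toStr p.1 :: PySem.List.slice p.2 (some 1) none).map String.toList) with hqs
  by_cases hfe : qs = []
  · simp [hfe, PySem.Chars.join_nil, PySem.Chars.rstrip]
  · rw [flatMap_vs_sentinel qs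
      (by intro q hq; rw [hqs] at hq; simp only [List.mem_map] at hq
          obtain ⟨p, _, rfl⟩ := hq; simp) hfe,
      rstrip_append_newline]
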